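-- pv_equiv track=rewrite | github.com/Goo-JZhang/cs50 | 6-language/questions/questions.py | standarize_word
-- ===== SOURCE A (Python) =====
-- def standarize_word(s):
--     true_word = False
--     ret_s = ""
--     for w in s:
--         if ord(w)>=ord("A") and ord(w)<=ord("Z"):
--             ret_s = ret_s + chr(ord(w) - ord("A") + ord("a"))
--             true_word = True
--         elif ord(w)>=ord("a") and ord(w)<=ord("z"):
--             ret_s = ret_s + w
--             true_word = True
--         else:
--             ret_s = ret_s + w
--     if true_word:
--         return ret_s
--     else:
--         return None
-- ===== SOURCE B (Python) =====
-- import string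
--
-- _TABLE = {ord(c): ord(c) + 32 for c in string.ascii_uppercase}
-- _LETTERS = set(string.ascii_letters)
--
-- def standarize_word(s):
--     if not any(c in _LETTERS for c in s):
--         return None
--     return s.translate(_TABLE)
-- ===== Notes on version B (the rewrite author's own statement) =====
-- stated objective: idiomatic
-- what changed: Replaced A's single fused loop carrying a found-letter flag and a quadratic string accumulator by a separate ASCII-letter presence scan (any) plus a table-driven str.translate mapping uppercase codepoints to lowercase.
import Mathlib
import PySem

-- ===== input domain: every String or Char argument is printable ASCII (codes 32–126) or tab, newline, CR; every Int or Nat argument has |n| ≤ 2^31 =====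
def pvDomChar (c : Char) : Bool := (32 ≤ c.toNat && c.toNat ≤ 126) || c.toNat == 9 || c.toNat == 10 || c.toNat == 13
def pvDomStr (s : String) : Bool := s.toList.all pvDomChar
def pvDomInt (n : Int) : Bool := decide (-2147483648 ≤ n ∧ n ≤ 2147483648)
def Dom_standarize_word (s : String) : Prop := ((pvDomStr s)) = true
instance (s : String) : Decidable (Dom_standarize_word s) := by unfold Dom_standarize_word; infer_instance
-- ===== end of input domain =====

-- B replaces A's fused flag+accumulator loop by one ASCII-letter presence scan plus a
-- table-driven character map (str.translate); same return value, objective: idiomatic.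

-- ===== PORT A =====
-- A's single loop over the characters, carrying (true_word, ret_s); ret_s is kept as
-- List Char and converted with String.mk at the end (exact for ASCII concatenation).
def standarize_word (s : String) : Option String :=
  let st := s.toList.foldl
    (fun (acc : Bool × List Char) w =>
      if 65 ≤ w.toNat ∧ w.toNat ≤ 90 then
        (true, acc.2 ++ [Char.ofNat (w.toNat - 65 + 97)])
      else if 97 ≤ w.toNat ∧ w.toNat ≤ 122 then
        (true, acc.2 ++ [w])
      else
        (acc.1, acc.2 ++ [w]))
    (false, [])
  if st.1 then some (String.mk st.2) else none

-- ===== PORT B =====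
-- membership test in _LETTERS (ASCII letters)
def pvIsAsciiLetter (c : Char) : Bool :=
  (65 ≤ c.toNat && c.toNat ≤ 90) || (97 ≤ c.toNat && c.toNat ≤ 122)

-- the translation table: uppercase ASCII ↦ codepoint + 32, everything else unchanged
def pvTranslate (c : Char) : Char :=
  if 65 ≤ c.toNat ∧ c.toNat ≤ 90 then Char.ofNat (c.toNat + 32) else c

def standarize_word_alt (s : String) : Option String :=
  if !(s.toList.any pvIsAsciiLetter) then none
  else some (String.mk (s.toList.map pvTranslate))

-- ===== PRECONDITION & SPEC =====
def Spec_standarize_word (s : String) (out : Option String) : Prop := out = standarize_word_alt s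
instance (s : String) (out : Option String) : Decidable (Spec_standarize_word s out) := by unfold Spec_standarize_word; infer_instance

-- ===== CLAIM (what is proved, stated in full; the proofs are below) =====
def Claim_equal_standarize_word : Prop := ∀ (s : String), Dom_standarize_word s → Spec_standarize_word s (standarize_word s)

-- ===== LEMMAS AND PROOFS =====
theorem standarize_word_foldl (l : List Char) (b : Bool) (acc : List Char) :
    l.foldl
      (fun (acc : Bool × List Char) w =>
        if 65 ≤ w.toNat ∧ w.toNat ≤ 90 then
          (true, acc.2 ++ [Char.ofNat (w.toNat - 65 + 97)])
        else if 97 ≤ w.toNat ∧ w.toNat ≤ 122 then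
          (true, acc.2 ++ [w])
        else
          (acc.1, acc.2 ++ [w]))
      (b, acc)
    = (b || l.any pvIsAsciiLetter, acc ++ l.map pvTranslate) := by
  induction l generalizing b acc with
  | nil => simp
  | cons c l ih =>
    simp only [List.foldl_cons, List.any_cons, List.map_cons]
    by_cases h1 : 65 ≤ c.toNat ∧ c.toNat ≤ 90
    · have htr : Char.ofNat (c.toNat - 65 + 97) = pvTranslate c := by
        unfold pvTranslate
        rw [if_pos h1]
        congr 1
        omega
      rw [if_pos h1, ih, htr]
      have hl : pvIsAsciiLetter c = true := by
        unfold pvIsAsciiLetter; simp; omega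
      simp [hl]
    · rw [if_neg h1]
      by_cases h2 : 97 ≤ c.toNat ∧ c.toNat ≤ 122
      · rw [if_pos h2, ih]
        have hl : pvIsAsciiLetter c = true := by
          unfold pvIsAsciiLetter; simp; omega
        have htr : pvTranslate c = c := by
          unfold pvTranslate; rw [if_neg h1]
        simp [hl, htr]
      · rw [if_neg h2, ih]
        have hl : pvIsAsciiLetter c = false := by
          unfold pvIsAsciiLetter; simp; omega
        have htr : pvTranslate c = c := by
          unfold pvTranslate; rw [if_neg h1]
        simp [hl, htr]

-- ===== VERDICT (by name: the statement is the Claim_ definition above) =====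
theorem standarize_word_spec : Claim_equal_standarize_word := by
  intro s _
  unfold Spec_standarize_word standarize_word standarize_word_alt
  rw [standarize_word_foldl]
  by_cases h : s.toList.any pvIsAsciiLetter
  · simp [h]
  · simp [h]
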